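-- pv_equiv track=rewrite | github.com/MarsElico/webScraping104 | _20250113找工作/_4_job_category_insights.py | get_top_skills
-- ===== SOURCE A (Python) =====
-- from typing import Dict, List, Tuple
--
-- def get_top_skills(category_skills: Dict[str, Dict[str, int]],
--                    min_frequency: int = 2,
--                    top_n: int = 15) -> Dict[str, List[Tuple[str, int]]]:
--     """
--     獲取每個類別的主要技能
--     """
--     result = {}
--     for category, skills in category_skills.items():
--         filtered_skills = [(skill, count) for skill, count in skills.items()
--                            if count >= min_frequency]
--         sorted_skills = sorted(filtered_skills, key=lambda x: x[1], reverse=True)[:top_n]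
--         if sorted_skills:
--             result[category] = sorted_skills
--     return result
-- ===== SOURCE B (Python) =====
-- from typing import Dict, List, Tuple
--
-- def get_top_skills(category_skills: Dict[str, Dict[str, int]],
--                    min_frequency: int = 2,
--                    top_n: int = 15) -> Dict[str, List[Tuple[str, int]]]:
--     """Single pass per category: filter inline and insertion-sort each kept
--     (skill, count) pair into a descending ranking (stable: inserted after
--     equal counts), then slice the top_n head."""
--     result = {}
--     for category, skills in category_skills.items():
--         ranked = []
--         for skill, count in skills.items():
--             if count >= min_frequency:
--                 i = 0
--                 while i < len(ranked) and ranked[i][1] >= count: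
--                     i += 1
--                 ranked.insert(i, (skill, count))
--         top_skills = ranked[:top_n]
--         if top_skills:
--             result[category] = top_skills
--     return result
-- ===== Notes on version B (the rewrite author's own statement) =====
-- stated objective: alternative
-- what changed: Replaces the per-category filter comprehension plus library sort(reverse=True)+slice with a single pass that inserts each qualifying pair into a stable descending ranking by hand (insertion sort with an explicit position scan), slicing at the end.
import Mathlib
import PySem

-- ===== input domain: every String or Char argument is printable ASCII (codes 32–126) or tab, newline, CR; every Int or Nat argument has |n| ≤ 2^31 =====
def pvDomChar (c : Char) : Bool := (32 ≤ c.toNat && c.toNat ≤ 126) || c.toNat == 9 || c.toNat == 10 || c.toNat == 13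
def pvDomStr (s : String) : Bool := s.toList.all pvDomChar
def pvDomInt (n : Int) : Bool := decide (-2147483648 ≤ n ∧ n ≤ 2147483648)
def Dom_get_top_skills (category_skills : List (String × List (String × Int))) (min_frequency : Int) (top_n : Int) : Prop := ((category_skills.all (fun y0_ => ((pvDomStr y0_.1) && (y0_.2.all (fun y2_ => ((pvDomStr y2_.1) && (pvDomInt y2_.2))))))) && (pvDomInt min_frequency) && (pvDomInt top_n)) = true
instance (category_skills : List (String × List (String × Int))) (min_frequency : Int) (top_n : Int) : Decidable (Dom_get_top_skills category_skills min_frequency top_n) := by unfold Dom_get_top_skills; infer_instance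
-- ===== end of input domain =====

-- B replaces A's per-category filter comprehension + library reverse sort + slice by a single pass
-- that insertion-sorts each qualifying pair into a stable descending ranking (alternative algorithm,
-- same result; equivalence of the RETURN value is what is proved).

-- ===== PORT A =====
def get_top_skills (category_skills : List (String × List (String × Int))) (min_frequency : Int) (top_n : Int) : List (String × List (String × Int)) :=
  category_skills.foldl (fun result c =>
    let filtered_skills := c.2.filter (fun sc => decide (sc.2 ≥ min_frequency))
    let sorted_skills := PySem.List.slice (PySem.List.sorted filtered_skills (fun x => x.2) true) none (some top_n)
    if sorted_skills ≠ [] then result ++ [(c.1, sorted_skills)] else result) []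

-- ===== PORT B =====
-- Source B's inner while+insert: place x after every element whose count is ≥ x's count
def insertRanked (x : String × Int) : List (String × Int) → List (String × Int)
  | [] => [x]
  | y :: t => if y.2 ≥ x.2 then y :: insertRanked x t else x :: y :: t

def get_top_skills_alt (category_skills : List (String × List (String × Int))) (min_frequency : Int) (top_n : Int) : List (String × List (String × Int)) :=
  category_skills.foldl (fun result c =>
    let ranked := c.2.foldl (fun acc sc => if sc.2 ≥ min_frequency then insertRanked sc acc else acc) []
    let top_skills := PySem.List.slice ranked none (some top_n)
    if top_skills ≠ [] then result ++ [(c.1, top_skills)] else result) []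

-- ===== PRECONDITION & SPEC =====
def Spec_get_top_skills (category_skills : List (String × List (String × Int))) (min_frequency : Int) (top_n : Int) (out : List (String × List (String × Int))) : Prop := out = get_top_skills_alt category_skills min_frequency top_n
instance (category_skills : List (String × List (String × Int))) (min_frequency : Int) (top_n : Int) (out : List (String × List (String × Int))) : Decidable (Spec_get_top_skills category_skills min_frequency top_n out) := by unfold Spec_get_top_skills; infer_instance

-- ===== CLAIM (what is proved, stated in full; the proofs are below) =====
def Claim_equal_get_top_skills : Prop := ∀ (category_skills : List (String × List (String × Int))) (min_frequency : Int) (top_n : Int), Dom_get_top_skills category_skills min_frequency top_n → Spec_get_top_skills category_skills min_frequency top_n (get_top_skills category_skills min_frequency top_n)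

-- ===== LEMMAS AND PROOFS =====

theorem insertRanked_eq (x : String × Int) (l : List (String × Int)) :
    insertRanked x l = PySem.List.insertBy (fun a b => decide (b.2 < a.2)) x l := by
  induction l with
  | nil => simp [insertRanked, PySem.List.insertBy]
  | cons y t ih =>
    by_cases h : y.2 < x.2
    · simp [insertRanked, PySem.List.insertBy, h, not_le.mpr h]
    · simp [insertRanked, PySem.List.insertBy, h, not_lt.mp h, ih]

theorem ranked_eq (min_frequency : Int) (l : List (String × Int)) :
    l.foldl (fun acc sc => if sc.2 ≥ min_frequency then insertRanked sc acc else acc) [] =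
      PySem.List.sorted (l.filter (fun sc => decide (sc.2 ≥ min_frequency))) (fun x => x.2) true := by
  rw [PySem.List.sorted_rev_eq_foldl_insertBy,
      PySem.List.foldl_ite_eq_foldl_filter (p := fun sc : String × Int => sc.2 ≥ min_frequency)]
  simp only [insertRanked_eq]

-- ===== VERDICT (by name: the statement is the Claim_ definition above) =====
theorem get_top_skills_spec : Claim_equal_get_top_skills := by
  intro category_skills min_frequency top_n _
  unfold Spec_get_top_skills get_top_skills get_top_skills_alt
  apply PySem.List.foldl_congr_mem
  intro acc c _
  simp only [ranked_eq]
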